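-- pv_equiv track=rewrite | github.com/dglee0517/CodingTestStudy | 20230503_python_Algorithm.py | solution
-- ===== SOURCE A (Python) =====
-- def solution(arr):
--     stk = []
--     i = 0
--     while i < len(arr):
--         if len(stk) == 0:
--             stk.append(arr[i])
--             i += 1
--         elif len(stk) > 0:
--             if stk[-1] < arr[i]:
--                 stk.append(arr[i])
--                 i += 1
--             elif stk[-1] >= arr[i]:
--                 stk.pop()
--     return stk
-- ===== SOURCE B (Python) =====
-- def solution(arr):
--     result = []
--     for x in reversed(arr):
--         if not result or x < result[-1]:
--             result.append(x)
--     result.reverse()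
--     return result
-- ===== Notes on version B (the rewrite author's own statement) =====
-- stated objective: faster
-- what changed: A simulates a stack over the array, popping every stacked element >= the current one before pushing; B instead scans the array once in reverse keeping only elements strictly below the last kept element (the running minimum) and reverses the result, so no element is ever revisited or popped.
import Mathlib
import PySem

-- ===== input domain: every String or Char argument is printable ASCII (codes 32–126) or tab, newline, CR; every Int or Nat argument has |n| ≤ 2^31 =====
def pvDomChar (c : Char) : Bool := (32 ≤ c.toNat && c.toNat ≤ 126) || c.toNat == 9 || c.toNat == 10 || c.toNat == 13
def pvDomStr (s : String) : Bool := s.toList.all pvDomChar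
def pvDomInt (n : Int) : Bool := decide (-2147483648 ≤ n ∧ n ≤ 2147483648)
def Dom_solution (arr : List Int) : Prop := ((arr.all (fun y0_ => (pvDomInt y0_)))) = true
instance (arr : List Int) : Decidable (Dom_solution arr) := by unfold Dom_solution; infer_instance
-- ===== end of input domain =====

-- B replaces A's forward stack simulation (pop-while-top-≥, then push) by a single reverse
-- scan keeping a running strict minimum: no pops or re-visits (measured faster by a constant factor).

-- ===== PORT A =====
-- A's while loop over index i with stack stk; state = (stk, arr.drop i).
-- Python appends/pops at the END of stk, so the stack top is getLast? / dropLast.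
def solutionLoop (stk : List Int) (rest : List Int) : List Int :=
  match rest with
  | [] => stk
  | x :: rest' =>
    match h : stk.getLast? with
    | none => solutionLoop (stk ++ [x]) rest'          -- len(stk)==0: push, i += 1
    | some t =>
      if t < x then solutionLoop (stk ++ [x]) rest'    -- stk[-1] < arr[i]: push, i += 1
      else solutionLoop stk.dropLast (x :: rest')      -- stk[-1] >= arr[i]: pop
termination_by (rest.length, stk.length)
decreasing_by
  · exact Prod.Lex.left _ _ (by simp)
  · exact Prod.Lex.left _ _ (by simp)
  · apply Prod.Lex.right
    have hne : stk ≠ [] := by rintro rfl; simp at h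
    have := List.length_pos_of_ne_nil hne
    simp [List.length_dropLast]; omega

def solution (arr : List Int) : List Int := solutionLoop [] arr

-- ===== PORT B =====
-- one step of B's for-loop: keep x iff result is empty or x < result[-1]
def altStep (res : List Int) (x : Int) : List Int :=
  match res.getLast? with
  | none => res ++ [x]
  | some y => if x < y then res ++ [x] else res

def solution_alt (arr : List Int) : List Int :=
  (arr.reverse.foldl altStep []).reverse

-- ===== PRECONDITION & SPEC =====
def Spec_solution (arr : List Int) (out : List Int) : Prop := out = solution_alt arr
instance (arr : List Int) (out : List Int) : Decidable (Spec_solution arr out) := by unfold Spec_solution; infer_instance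

-- ===== CLAIM (what is proved, stated in full; the proofs are below) =====
def Claim_equal_solution : Prop := ∀ (arr : List Int), Dom_solution arr → Spec_solution arr (solution arr)

-- ===== LEMMAS AND PROOFS =====

-- Common reference point: the strict right-to-left minima of arr, in original order.
def rmin : List Int → List Int
  | [] => []
  | x :: xs =>
    match rmin xs with
    | [] => [x]
    | y :: t => if x < y then x :: y :: t else y :: t

theorem rmin_nil_iff (l : List Int) : rmin l = [] ↔ l = [] := by
  cases l with
  | nil => simp [rmin]
  | cons x xs =>
    constructor
    · intro h
      exfalso
      simp only [rmin] at h
      cases hr : rmin xs with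
      | nil => rw [hr] at h; simp at h
      | cons y t => rw [hr] at h; by_cases hxy : x < y <;> simp [hxy] at h
    · intro h; simp at h

-- ----- A side -----

theorem pairwise_le_last {l : List Int} {t : Int} (hp : (l ++ [t]).Pairwise (· < ·)) :
    ∀ a ∈ l ++ [t], a ≤ t := by
  rw [List.pairwise_append] at hp
  intro a ha
  rcases List.mem_append.mp ha with h | h
  · exact le_of_lt (hp.2.2 a h t (by simp))
  · simp at h; omega

-- the pop phase followed by the push: on a strictly increasing stack it leaves filter (· < x)
theorem solutionLoop_popPush (x : Int) (rest : List Int) :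
    ∀ stk : List Int, stk.Pairwise (· < ·) →
      solutionLoop stk (x :: rest) = solutionLoop (stk.filter (· < x) ++ [x]) rest := by
  intro stk
  induction stk using List.reverseRecOn with
  | nil =>
    intro _
    simp only [List.filter_nil, List.nil_append]
    rw [solutionLoop]
    simp
  | append_singleton l t ih =>
    intro hp
    rw [solutionLoop]
    split
    next hnone => simp at hnone
    next t' hsome =>
    rw [List.getLast?_concat] at hsome
    injection hsome with hsome
    subst hsome
    by_cases h : t < x
    · simp only [if_pos h]
      have hall : ∀ a ∈ l ++ [t], a < x := by
        intro a ha
        have := pairwise_le_last hp a ha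
        omega
      rw [List.filter_eq_self.mpr (by intro a ha; exact decide_eq_true (hall a ha))]
    · simp only [if_neg h]
      have hdrop : (l ++ [t]).dropLast = l := by simp
      rw [hdrop, ih (hp.sublist (by simp))]
      have hfilt : (l ++ [t]).filter (· < x) = l.filter (· < x) := by
        rw [List.filter_append]; simp [h]
      rw [hfilt]

theorem pairwise_filter_append {l : List Int} (x : Int) (hp : l.Pairwise (· < ·)) :
    (l.filter (· < x) ++ [x]).Pairwise (· < ·) := by
  rw [List.pairwise_append]
  refine ⟨hp.filter _, List.pairwise_singleton _ _, ?_⟩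
  intro a ha b hb
  simp at hb; subst hb
  exact of_decide_eq_true (List.mem_filter.mp ha).2

theorem solutionLoop_eq_rmin (rest : List Int) :
    ∀ stk : List Int, stk.Pairwise (· < ·) →
      solutionLoop stk rest =
        (match rmin rest with
         | [] => stk
         | m :: _ => stk.filter (· < m) ++ rmin rest) := by
  induction rest with
  | nil => intro stk _; rw [solutionLoop]; simp [rmin]
  | cons x rest' ih =>
    intro stk hp
    rw [solutionLoop_popPush x rest' stk hp,
        ih _ (pairwise_filter_append x hp)]
    cases hr : rmin rest' with
    | nil =>
      have : rest' = [] := (rmin_nil_iff rest').mp hr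
      subst this
      simp [rmin]
    | cons m t =>
      simp only [rmin, hr]
      by_cases hxm : x < m
      · simp only [if_pos hxm]
        rw [List.filter_append]
        have h1 : ([x] : List Int).filter (· < m) = [x] := by simp [hxm]
        have h2 : (stk.filter (· < x)).filter (· < m) = stk.filter (· < x) := by
          apply List.filter_eq_self.mpr
          intro a ha
          have : a < x := of_decide_eq_true (List.mem_filter.mp ha).2
          exact decide_eq_true (by omega)
        rw [h1, h2]
        simp
      · simp only [if_neg hxm]
        rw [List.filter_append]
        have h1 : ([x] : List Int).filter (· < m) = [] := by simp [hxm]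
        have h2 : (stk.filter (· < x)).filter (· < m) = stk.filter (· < m) := by
          rw [List.filter_filter]
          apply List.filter_congr
          intro a _
          by_cases ham : a < m
          · simp [ham, show a < x by omega]
          · simp [ham]
        rw [h1, h2]
        simp

theorem solution_eq_rmin (arr : List Int) : solution arr = rmin arr := by
  unfold solution
  rw [solutionLoop_eq_rmin arr [] (List.Pairwise.nil)]
  cases hr : rmin arr with
  | nil => simp
  | cons m t => simp

-- ----- B side -----

theorem solution_alt_eq_rmin (arr : List Int) : solution_alt arr = rmin arr := by
  unfold solution_alt
  induction arr with
  | nil => simp [rmin]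
  | cons x xs ih =>
    rw [List.reverse_cons, List.foldl_append, List.foldl_cons, List.foldl_nil]
    have hr : xs.reverse.foldl altStep [] = (rmin xs).reverse := by
      rw [← ih]; simp
    rw [hr]
    unfold altStep
    rw [List.getLast?_reverse]
    cases hm : rmin xs with
    | nil => simp [rmin, hm]
    | cons y t =>
      simp only [List.head?_cons, rmin, hm]
      by_cases hxy : x < y
      · simp [hxy]
      · simp [hxy]

-- ===== VERDICT (by name: the statement is the Claim_ definition above) =====
theorem solution_spec : Claim_equal_solution := by
  intro arr _
  unfold Spec_solution
  rw [solution_eq_rmin, solution_alt_eq_rmin]
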